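-- pv_equiv track=rewrite | github.com/Arpik/codesignal-solutions | hash_sets/Lesson_3/Practice_2/exclusive_products.py | exclusive_products
-- ===== SOURCE A (Python) =====
-- def exclusive_products(inventory1, inventory2):
--
--     inv_1 = [item.upper() for item in inventory1]
--     inv_2 = [item.upper() for item in inventory2]
--
--     set_inv_1 = set(inv_1)
--     set_inv_2 = set(inv_2)
--
--     result_1 = list(set_inv_1 - set_inv_2)
--     result_2 = list(set_inv_2 - set_inv_1)
--
--     result_1.sort()
--     result_2.sort()
--
--     return result_1, result_2
-- ===== SOURCE B (Python) =====
-- def exclusive_products(inventory1, inventory2):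
--     # Sort-merge instead of hash-set difference: sort both uppercased lists,
--     # then one two-pointer merge pass emits each side's exclusive keys
--     # already in sorted order (duplicates skipped as they are consumed).
--     xs = sorted(item.upper() for item in inventory1)
--     ys = sorted(item.upper() for item in inventory2)
--     i, j = 0, 0
--     result_1, result_2 = [], []
--     while i < len(xs) or j < len(ys):
--         if j >= len(ys) or (i < len(xs) and xs[i] < ys[j]):
--             k = xs[i]
--             result_1.append(k)
--             while i < len(xs) and xs[i] == k:
--                 i += 1
--         elif i >= len(xs) or ys[j] < xs[i]:
--             k = ys[j]
--             result_2.append(k)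
--             while j < len(ys) and ys[j] == k:
--                 j += 1
--         else:
--             k = xs[i]
--             while i < len(xs) and xs[i] == k:
--                 i += 1
--             while j < len(ys) and ys[j] == k:
--                 j += 1
--     return result_1, result_2
-- ===== Notes on version B (the rewrite author's own statement) =====
-- stated objective: alternative
-- what changed: Replaces hash-set differences followed by sorting with a sort-merge: both uppercased lists are sorted first and a single two-pointer merge pass emits each side's exclusive keys directly in sorted order, skipping duplicates as they are consumed.
import Mathlib
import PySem

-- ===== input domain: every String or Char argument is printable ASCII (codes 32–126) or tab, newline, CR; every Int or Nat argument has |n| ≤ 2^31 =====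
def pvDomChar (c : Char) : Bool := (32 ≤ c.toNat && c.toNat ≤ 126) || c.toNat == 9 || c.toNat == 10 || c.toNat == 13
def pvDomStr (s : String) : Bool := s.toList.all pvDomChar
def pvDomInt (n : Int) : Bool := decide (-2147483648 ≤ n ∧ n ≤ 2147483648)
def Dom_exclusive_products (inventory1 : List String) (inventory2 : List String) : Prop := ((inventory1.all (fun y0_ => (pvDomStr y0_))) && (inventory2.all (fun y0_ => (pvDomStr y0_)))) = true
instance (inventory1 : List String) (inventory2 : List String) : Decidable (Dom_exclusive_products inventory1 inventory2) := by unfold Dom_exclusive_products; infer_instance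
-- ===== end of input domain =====

-- B replaces A's hash-set differences + final sorts by a sort-merge: sort both uppercased
-- lists, then one two-pointer merge pass emits each side's exclusive keys already in
-- sorted order, skipping duplicates as they are consumed (objective: alternative).

-- ===== PORT A =====
def exclusive_products (inventory1 : List String) (inventory2 : List String) : List String × List String :=
  let inv_1 := inventory1.map (fun item => PySem.Str.upper item)
  let inv_2 := inventory2.map (fun item => PySem.Str.upper item)
  let set_inv_1 := PySem.Set.ofList inv_1
  let set_inv_2 := PySem.Set.ofList inv_2
  -- list(set difference) then .sort(): sorting makes the result independent of set iteration order
  let result_1 := PySem.List.sorted (PySem.Set.diff set_inv_1 set_inv_2) (fun x => x) false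
  let result_2 := PySem.List.sorted (PySem.Set.diff set_inv_2 set_inv_1) (fun x => x) false
  (result_1, result_2)

-- ===== PORT B =====
def pvSkipEq (k : String) : List String → List String
  | [] => []
  | x :: t => if x = k then pvSkipEq k t else x :: t

theorem pvSkipEq_sublist (k : String) (l : List String) : (pvSkipEq k l).Sublist l := by
  induction l with
  | nil => simp [pvSkipEq]
  | cons x t ih =>
    simp only [pvSkipEq]
    split
    · exact ih.trans (List.sublist_cons_self x t)
    · exact List.Sublist.refl _

theorem pvSkipEq_length_le (k : String) (l : List String) : (pvSkipEq k l).length ≤ l.length :=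
  (pvSkipEq_sublist k l).length_le

def pvMergeExcl : List String → List String → List String × List String
  | [], [] => ([], [])
  | x :: xs, [] =>
      let r := pvMergeExcl (pvSkipEq x xs) []
      (x :: r.1, r.2)
  | [], y :: ys =>
      let r := pvMergeExcl [] (pvSkipEq y ys)
      (r.1, y :: r.2)
  | x :: xs, y :: ys =>
      if x < y then
        let r := pvMergeExcl (pvSkipEq x xs) (y :: ys)
        (x :: r.1, r.2)
      else if y < x then
        let r := pvMergeExcl (x :: xs) (pvSkipEq y ys)
        (r.1, y :: r.2)
      else
        pvMergeExcl (pvSkipEq x xs) (pvSkipEq y ys)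
termination_by xs ys => xs.length + ys.length
decreasing_by
  · have := pvSkipEq_length_le x xs; simp; omega
  · have := pvSkipEq_length_le y ys; simp; omega
  · have := pvSkipEq_length_le x xs; simp; omega
  · have := pvSkipEq_length_le y ys; simp; omega
  · have h1 := pvSkipEq_length_le x xs; have h2 := pvSkipEq_length_le y ys; simp; omega


def exclusive_products_alt (inventory1 : List String) (inventory2 : List String) : List String × List String :=
  let xs := PySem.List.sorted (inventory1.map (fun item => PySem.Str.upper item)) (fun x => x) false
  let ys := PySem.List.sorted (inventory2.map (fun item => PySem.Str.upper item)) (fun x => x) false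
  pvMergeExcl xs ys

-- ===== PRECONDITION & SPEC =====
def Spec_exclusive_products (inventory1 : List String) (inventory2 : List String) (out : List String × List String) : Prop := out = exclusive_products_alt inventory1 inventory2
instance (inventory1 : List String) (inventory2 : List String) (out : List String × List String) : Decidable (Spec_exclusive_products inventory1 inventory2 out) := by unfold Spec_exclusive_products; infer_instance

-- ===== CLAIM (what is proved, stated in full; the proofs are below) =====
def Claim_equal_exclusive_products : Prop := ∀ (inventory1 : List String) (inventory2 : List String), Dom_exclusive_products inventory1 inventory2 → Spec_exclusive_products inventory1 inventory2 (exclusive_products inventory1 inventory2)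

-- ===== LEMMAS AND PROOFS =====

theorem mem_pvSkipEq (k b : String) (l : List String)
    (hs : l.Pairwise (· ≤ ·)) (hlb : ∀ a ∈ l, k ≤ a) :
    b ∈ pvSkipEq k l ↔ b ∈ l ∧ b ≠ k := by
  induction l with
  | nil => simp [pvSkipEq]
  | cons x t ih =>
    rw [List.pairwise_cons] at hs
    simp only [pvSkipEq]
    split
    · rename_i hx
      rw [ih hs.2 (fun a ha => hlb a (List.mem_cons_of_mem x ha))]
      subst hx
      constructor
      · rintro ⟨hb, hbk⟩; exact ⟨List.mem_cons_of_mem _ hb, hbk⟩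
      · rintro ⟨hb, hbk⟩
        rcases List.mem_cons.1 hb with rfl | hb
        · exact absurd rfl hbk
        · exact ⟨hb, hbk⟩
    · rename_i hx
      constructor
      · intro hb
        refine ⟨hb, ?_⟩
        rintro rfl
        rcases List.mem_cons.1 hb with rfl | hb
        · exact hx rfl
        · exact hx (le_antisymm (hlb x (List.mem_cons_self)) (hs.1 b hb)).symm
      · exact fun h => h.1

theorem pvMergeExcl_spec_aux (n : Nat) : ∀ (xs ys : List String), xs.length + ys.length = n →
    xs.Pairwise (· ≤ ·) → ys.Pairwise (· ≤ ·) →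
    (∀ b, b ∈ (pvMergeExcl xs ys).1 ↔ b ∈ xs ∧ b ∉ ys) ∧
    (∀ b, b ∈ (pvMergeExcl xs ys).2 ↔ b ∈ ys ∧ b ∉ xs) ∧
    (pvMergeExcl xs ys).1.Pairwise (· < ·) ∧
    (pvMergeExcl xs ys).2.Pairwise (· < ·) := by
  induction n using Nat.strong_induction_on with
  | _ n ih =>
  intro xs ys hn hxs hys
  match xs, ys with
  | [], [] => simp [pvMergeExcl]
  | x :: xs, [] =>
    rw [List.pairwise_cons] at hxs
    have hlen := pvSkipEq_length_le x xs
    have hmem : ∀ b, b ∈ pvSkipEq x xs ↔ b ∈ xs ∧ b ≠ x :=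
      fun b => mem_pvSkipEq x b xs hxs.2 hxs.1
    obtain ⟨m1, m2, p1, p2⟩ := ih ((pvSkipEq x xs).length + ([] : List String).length)
      (by simp at hn ⊢; omega) (pvSkipEq x xs) []
      rfl (hxs.2.sublist (pvSkipEq_sublist x xs)) (by simp)
    refine ⟨?_, ?_, ?_, ?_⟩
    · intro b
      simp only [pvMergeExcl]
      rw [List.mem_cons, m1 b, hmem b]
      constructor
      · rintro (rfl | ⟨⟨hb, _⟩, _⟩)
        · exact ⟨List.mem_cons_self, List.not_mem_nil⟩
        · exact ⟨List.mem_cons_of_mem _ hb, List.not_mem_nil⟩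
      · rintro ⟨hb, -⟩
        rcases List.mem_cons.1 hb with rfl | hb
        · exact Or.inl rfl
        · by_cases hbx : b = x
          · exact Or.inl hbx
          · exact Or.inr ⟨⟨hb, hbx⟩, List.not_mem_nil⟩
    · intro b; simp only [pvMergeExcl]; rw [m2 b]; simp
    · simp only [pvMergeExcl, List.pairwise_cons]
      refine ⟨?_, p1⟩
      intro b hb
      obtain ⟨hb', -⟩ := (m1 b).1 hb
      obtain ⟨hbxs, hbx⟩ := (hmem b).1 hb'
      exact lt_of_le_of_ne (hxs.1 b hbxs) (Ne.symm hbx)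
    · simpa only [pvMergeExcl] using p2
  | [], y :: ys =>
    rw [List.pairwise_cons] at hys
    have hlen := pvSkipEq_length_le y ys
    have hmem : ∀ b, b ∈ pvSkipEq y ys ↔ b ∈ ys ∧ b ≠ y :=
      fun b => mem_pvSkipEq y b ys hys.2 hys.1
    obtain ⟨m1, m2, p1, p2⟩ := ih (([] : List String).length + (pvSkipEq y ys).length)
      (by simp at hn ⊢; omega) [] (pvSkipEq y ys)
      rfl (by simp) (hys.2.sublist (pvSkipEq_sublist y ys))
    refine ⟨?_, ?_, ?_, ?_⟩
    · intro b; simp only [pvMergeExcl]; rw [m1 b]; simp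
    · intro b
      simp only [pvMergeExcl]
      rw [List.mem_cons, m2 b, hmem b]
      constructor
      · rintro (rfl | ⟨⟨hb, _⟩, _⟩)
        · exact ⟨List.mem_cons_self, List.not_mem_nil⟩
        · exact ⟨List.mem_cons_of_mem _ hb, List.not_mem_nil⟩
      · rintro ⟨hb, -⟩
        rcases List.mem_cons.1 hb with rfl | hb
        · exact Or.inl rfl
        · by_cases hby : b = y
          · exact Or.inl hby
          · exact Or.inr ⟨⟨hb, hby⟩, List.not_mem_nil⟩
    · simpa only [pvMergeExcl] using p1
    · simp only [pvMergeExcl, List.pairwise_cons]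
      refine ⟨?_, p2⟩
      intro b hb
      obtain ⟨hb', -⟩ := (m2 b).1 hb
      obtain ⟨hbys, hby⟩ := (hmem b).1 hb'
      exact lt_of_le_of_ne (hys.1 b hbys) (Ne.symm hby)
  | x :: xs, y :: ys =>
    rw [List.pairwise_cons] at hxs hys
    have hmemx : ∀ b, b ∈ pvSkipEq x xs ↔ b ∈ xs ∧ b ≠ x :=
      fun b => mem_pvSkipEq x b xs hxs.2 hxs.1
    have hmemy : ∀ b, b ∈ pvSkipEq y ys ↔ b ∈ ys ∧ b ≠ y :=
      fun b => mem_pvSkipEq y b ys hys.2 hys.1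
    have hlenx := pvSkipEq_length_le x xs
    have hleny := pvSkipEq_length_le y ys
    by_cases hxy : x < y
    · obtain ⟨m1, m2, p1, p2⟩ := ih ((pvSkipEq x xs).length + (y :: ys).length)
        (by simp at hn ⊢; omega) (pvSkipEq x xs) (y :: ys)
        rfl (hxs.2.sublist (pvSkipEq_sublist x xs)) (List.pairwise_cons.2 hys)
      have hxny : x ∉ y :: ys := by
        intro hx
        rcases List.mem_cons.1 hx with rfl | hx
        · exact absurd hxy (lt_irrefl x)
        · exact absurd (lt_of_lt_of_le hxy (hys.1 x hx)) (lt_irrefl x)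
      refine ⟨?_, ?_, ?_, ?_⟩
      · intro b
        simp only [pvMergeExcl, if_pos hxy]
        rw [List.mem_cons, m1 b, hmemx b]
        constructor
        · rintro (rfl | ⟨⟨hb, _⟩, hnb⟩)
          · exact ⟨List.mem_cons_self, hxny⟩
          · exact ⟨List.mem_cons_of_mem _ hb, hnb⟩
        · rintro ⟨hb, hnb⟩
          rcases List.mem_cons.1 hb with rfl | hb
          · exact Or.inl rfl
          · by_cases hbx : b = x
            · exact Or.inl hbx
            · exact Or.inr ⟨⟨hb, hbx⟩, hnb⟩
      · intro b
        simp only [pvMergeExcl, if_pos hxy]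
        rw [m2 b, hmemx b]
        constructor
        · rintro ⟨hb, hnb⟩
          refine ⟨hb, ?_⟩
          intro hbx
          have hby : y ≤ b := by
            rcases List.mem_cons.1 hb with rfl | hb'
            · exact le_refl _
            · exact hys.1 b hb'
          have hbnex : b ≠ x := fun h => absurd (lt_of_lt_of_le hxy hby)
            (by rw [h]; exact lt_irrefl x)
          rcases List.mem_cons.1 hbx with rfl | hbx'
          · exact hbnex rfl
          · exact hnb ⟨hbx', hbnex⟩
        · rintro ⟨hb, hnb⟩
          refine ⟨hb, ?_⟩
          rintro ⟨hbxs, -⟩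
          exact hnb (List.mem_cons_of_mem _ hbxs)
      · simp only [pvMergeExcl, if_pos hxy, List.pairwise_cons]
        refine ⟨?_, p1⟩
        intro b hb
        obtain ⟨hb', -⟩ := (m1 b).1 hb
        obtain ⟨hbxs, hbx⟩ := (hmemx b).1 hb'
        exact lt_of_le_of_ne (hxs.1 b hbxs) (Ne.symm hbx)
      · simpa only [pvMergeExcl, if_pos hxy] using p2
    · by_cases hyx : y < x
      · obtain ⟨m1, m2, p1, p2⟩ := ih ((x :: xs).length + (pvSkipEq y ys).length)
          (by simp at hn ⊢; omega) (x :: xs) (pvSkipEq y ys)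
          rfl (List.pairwise_cons.2 hxs) (hys.2.sublist (pvSkipEq_sublist y ys))
        have hynx : y ∉ x :: xs := by
          intro hy
          rcases List.mem_cons.1 hy with rfl | hy
          · exact absurd hyx (lt_irrefl y)
          · exact absurd (lt_of_lt_of_le hyx (hxs.1 y hy)) (lt_irrefl y)
        refine ⟨?_, ?_, ?_, ?_⟩
        · intro b
          simp only [pvMergeExcl, if_neg hxy, if_pos hyx]
          rw [m1 b, hmemy b]
          constructor
          · rintro ⟨hb, hnb⟩
            refine ⟨hb, ?_⟩
            intro hby
            have hbx : x ≤ b := by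
              rcases List.mem_cons.1 hb with rfl | hb'
              · exact le_refl _
              · exact hxs.1 b hb'
            have hbney : b ≠ y := fun h => absurd (lt_of_lt_of_le hyx hbx)
              (by rw [h]; exact lt_irrefl y)
            rcases List.mem_cons.1 hby with rfl | hby'
            · exact hbney rfl
            · exact hnb ⟨hby', hbney⟩
          · rintro ⟨hb, hnb⟩
            refine ⟨hb, ?_⟩
            rintro ⟨hbys, -⟩
            exact hnb (List.mem_cons_of_mem _ hbys)
        · intro b
          simp only [pvMergeExcl, if_neg hxy, if_pos hyx]
          rw [List.mem_cons, m2 b, hmemy b]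
          constructor
          · rintro (rfl | ⟨⟨hb, _⟩, hnb⟩)
            · exact ⟨List.mem_cons_self, hynx⟩
            · exact ⟨List.mem_cons_of_mem _ hb, hnb⟩
          · rintro ⟨hb, hnb⟩
            rcases List.mem_cons.1 hb with rfl | hb
            · exact Or.inl rfl
            · by_cases hby : b = y
              · exact Or.inl hby
              · exact Or.inr ⟨⟨hb, hby⟩, hnb⟩
        · simpa only [pvMergeExcl, if_neg hxy, if_pos hyx] using p1
        · simp only [pvMergeExcl, if_neg hxy, if_pos hyx, List.pairwise_cons]
          refine ⟨?_, p2⟩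
          intro b hb
          obtain ⟨hb', -⟩ := (m2 b).1 hb
          obtain ⟨hbys, hby⟩ := (hmemy b).1 hb'
          exact lt_of_le_of_ne (hys.1 b hbys) (Ne.symm hby)
      · have hxeqy : x = y := le_antisymm (le_of_not_gt hyx) (le_of_not_gt hxy)
        subst hxeqy
        obtain ⟨m1, m2, p1, p2⟩ := ih ((pvSkipEq x xs).length + (pvSkipEq x ys).length)
          (by simp at hn ⊢; omega) (pvSkipEq x xs) (pvSkipEq x ys)
          rfl (hxs.2.sublist (pvSkipEq_sublist x xs)) (hys.2.sublist (pvSkipEq_sublist x ys))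
        refine ⟨?_, ?_, ?_, ?_⟩
        · intro b
          simp only [pvMergeExcl, if_neg hxy]
          rw [m1 b, hmemx b, hmemy b]
          constructor
          · rintro ⟨⟨hb, hbx⟩, hnb⟩
            refine ⟨List.mem_cons_of_mem _ hb, ?_⟩
            intro hby
            rcases List.mem_cons.1 hby with rfl | hby'
            · exact hbx rfl
            · exact hnb ⟨hby', hbx⟩
          · rintro ⟨hb, hnb⟩
            have hbx : b ≠ x := fun h => hnb (h ▸ List.mem_cons_self)
            rcases List.mem_cons.1 hb with rfl | hb'
            · exact absurd rfl hbx
            · exact ⟨⟨hb', hbx⟩, fun h => hnb (List.mem_cons_of_mem _ h.1)⟩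
        · intro b
          simp only [pvMergeExcl, if_neg hxy]
          rw [m2 b, hmemx b, hmemy b]
          constructor
          · rintro ⟨⟨hb, hbx⟩, hnb⟩
            refine ⟨List.mem_cons_of_mem _ hb, ?_⟩
            intro hby
            rcases List.mem_cons.1 hby with rfl | hby'
            · exact hbx rfl
            · exact hnb ⟨hby', hbx⟩
          · rintro ⟨hb, hnb⟩
            have hbx : b ≠ x := fun h => hnb (h ▸ List.mem_cons_self)
            rcases List.mem_cons.1 hb with rfl | hb'
            · exact absurd rfl hbx
            · exact ⟨⟨hb', hbx⟩, fun h => hnb (List.mem_cons_of_mem _ h.1)⟩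
        · simpa only [pvMergeExcl, if_neg hxy] using p1
        · simpa only [pvMergeExcl, if_neg hxy] using p2

theorem exclusive_products_eq (inventory1 inventory2 : List String) :
    exclusive_products inventory1 inventory2 = exclusive_products_alt inventory1 inventory2 := by
  unfold exclusive_products exclusive_products_alt
  set u1 := inventory1.map (fun item => PySem.Str.upper item) with hu1
  set u2 := inventory2.map (fun item => PySem.Str.upper item) with hu2
  set xs := PySem.List.sorted u1 (fun x => x) false with hxs
  set ys := PySem.List.sorted u2 (fun x => x) false with hys
  have hpx : xs.Pairwise (· ≤ ·) := PySem.List.sorted_pairwise u1 (fun x => x)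
  have hpy : ys.Pairwise (· ≤ ·) := PySem.List.sorted_pairwise u2 (fun x => x)
  obtain ⟨m1, m2, p1, p2⟩ := pvMergeExcl_spec_aux (xs.length + ys.length) xs ys rfl hpx hpy
  refine Prod.ext ?_ ?_
  · show PySem.List.sorted (PySem.Set.diff (PySem.Set.ofList u1) (PySem.Set.ofList u2)) (fun x => x) false
      = (pvMergeExcl xs ys).1
    apply PySem.List.sorted_eq_of_perm_of_pairwise_lt
    · rw [List.perm_ext_iff_of_nodup p1.nodup
        (PySem.Set.nodup_diff _ _ (PySem.Set.nodup_ofList _))]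
      intro b
      rw [m1 b, PySem.Set.mem_diff, PySem.Set.mem_ofList, PySem.Set.mem_ofList,
        PySem.List.mem_sorted u1 (fun x => x) false b, PySem.List.mem_sorted u2 (fun x => x) false b]
    · exact p1
  · show PySem.List.sorted (PySem.Set.diff (PySem.Set.ofList u2) (PySem.Set.ofList u1)) (fun x => x) false
      = (pvMergeExcl xs ys).2
    apply PySem.List.sorted_eq_of_perm_of_pairwise_lt
    · rw [List.perm_ext_iff_of_nodup p2.nodup
        (PySem.Set.nodup_diff _ _ (PySem.Set.nodup_ofList _))]
      intro b
      rw [m2 b, PySem.Set.mem_diff, PySem.Set.mem_ofList, PySem.Set.mem_ofList,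
        PySem.List.mem_sorted u2 (fun x => x) false b, PySem.List.mem_sorted u1 (fun x => x) false b]
    · exact p2

-- ===== VERDICT (by name: the statement is the Claim_ definition above) =====
theorem exclusive_products_spec : Claim_equal_exclusive_products := by
  intro inventory1 inventory2 _
  unfold Spec_exclusive_products
  exact exclusive_products_eq inventory1 inventory2
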